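-- pv_equiv track=rewrite | github.com/TOWHID16/MYThesisProject | 3_run_scot_sql.py | _segment_plan
-- ===== SOURCE A (Python) =====
-- def _segment_plan(plan_text: str) -> dict:
--     """Split SCoT-Plan text into clause->lines (first match wins for each clause)."""
--     clauses = ["- from:", "- where:", "- group by:", "- having:", "- order by:", "- select:", "- limit:"]
--     out = {c: [] for c in clauses}
--     for line in plan_text.splitlines():
--         s = line.strip()
--         sl = s.lower()
--         for c in clauses:
--             if sl.startswith(c):
--                 out[c].append(s.split(":", 1)[1].strip())
--                 break
--     return out
-- ===== SOURCE B (Python) =====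
-- def _segment_plan(plan_text: str) -> dict:
--     """Split SCoT-Plan text into clause->lines via one keyed lookup per line."""
--     clauses = ["- from:", "- where:", "- group by:", "- having:", "- order by:", "- select:", "- limit:"]
--     out = {c: [] for c in clauses}
--     for line in plan_text.splitlines():
--         s = line.strip()
--         i = s.find(':')
--         if i < 0:
--             continue
--         key = s[:i].lower() + ':'
--         if key in out:
--             out[key].append(s[i + 1:].strip())
--     return out
-- ===== Notes on version B (the rewrite author's own statement) =====
-- stated objective: idiomatic
-- what changed: Replaces the inner 7-way startswith scan per line with a single first-colon split and one keyed dict lookup.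
import Mathlib
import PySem

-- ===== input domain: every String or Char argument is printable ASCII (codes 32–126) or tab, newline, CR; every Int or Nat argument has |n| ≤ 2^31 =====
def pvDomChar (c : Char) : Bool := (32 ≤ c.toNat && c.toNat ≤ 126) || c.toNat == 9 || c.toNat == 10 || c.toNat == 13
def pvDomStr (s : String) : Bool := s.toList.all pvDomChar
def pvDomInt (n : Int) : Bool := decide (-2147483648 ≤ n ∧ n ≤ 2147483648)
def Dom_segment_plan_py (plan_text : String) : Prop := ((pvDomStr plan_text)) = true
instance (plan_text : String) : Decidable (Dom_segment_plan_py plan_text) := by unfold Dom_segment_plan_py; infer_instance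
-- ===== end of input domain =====

-- B replaces A's inner 7-way startswith scan per line by one first-colon split and a single keyed dict lookup (objective: idiomatic).

-- ===== PORT A =====
def pvClauses : List String := ["- from:", "- where:", "- group by:", "- having:", "- order by:", "- select:", "- limit:"]

-- s.split(":", 1)[1].strip() — the getD defaults are never used: index 1 exists whenever the startswith guard held
def pvTail (s : String) : String :=
  PySem.Str.strip ((PySem.List.pyGet? ((PySem.Str.splitMax? s ":" 1).getD []) 1).getD "")

-- the inner 'for c in clauses: if sl.startswith(c): out[c].append(...); break'
def pvScan (s sl : String) : List String → PySem.Dict String (List String) → PySem.Dict String (List String)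
  | [], out => out
  | c :: rest, out =>
    if PySem.Str.startswith sl c then out.modify c [] (fun v => v ++ [pvTail s])
    else pvScan s sl rest out

def segment_plan_py (plan_text : String) : List (String × List String) :=
  let out : PySem.Dict String (List String) :=
    pvClauses.foldl (fun d c => d.insert c []) PySem.Dict.empty
  ((PySem.Str.splitlines plan_text).foldl
      (fun out line =>
        let s := PySem.Str.strip line
        let sl := PySem.Str.lower s
        pvScan s sl pvClauses out) out).items

-- ===== PORT B =====
def segment_plan_py_alt (plan_text : String) : List (String × List String) :=
  let out : PySem.Dict String (List String) :=
    pvClauses.foldl (fun d c => d.insert c []) PySem.Dict.empty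
  ((PySem.Str.splitlines plan_text).foldl
      (fun out line =>
        let s := PySem.Str.strip line
        let i := PySem.Str.find s ":"
        if i < 0 then out
        else
          let key := PySem.Str.lower (PySem.Str.slice s none (some i)) ++ ":"
          if out.contains key then
            out.modify key [] (fun v => v ++ [PySem.Str.strip (PySem.Str.slice s (some (i + 1)) none)])
          else out) out).items

-- ===== PRECONDITION & SPEC =====
def Spec_segment_plan_py (plan_text : String) (out : List (String × List String)) : Prop := out = segment_plan_py_alt plan_text
instance (plan_text : String) (out : List (String × List String)) : Decidable (Spec_segment_plan_py plan_text out) := by unfold Spec_segment_plan_py; infer_instance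

-- ===== CLAIM (what is proved, stated in full; the proofs are below) =====
def Claim_equal_segment_plan_py : Prop := ∀ (plan_text : String), Dom_segment_plan_py plan_text → Spec_segment_plan_py plan_text (segment_plan_py plan_text)

-- ===== LEMMAS AND PROOFS =====

theorem pv_lowerChar_colon (c : Char) : PySem.Chars.lowerChar c = ':' ↔ c = ':' := by
  unfold PySem.Chars.lowerChar PySem.Chars.isupper
  by_cases h : 'A' ≤ c ∧ c ≤ 'Z'
  · rw [Char.le_def, Char.le_def] at h
    obtain ⟨h1, h2⟩ := h
    have hb : 65 ≤ c.toNat ∧ c.toNat ≤ 90 := ⟨h1, h2⟩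
    rw [if_pos (by simp [Char.le_def]; exact ⟨h1, h2⟩)]
    constructor
    · intro he
      have hch : (Char.ofNat (c.toNat + 32)).toNat = 58 := by rw [he]; rfl
      have hv : (c.toNat + 32).isValidChar := Or.inl (by omega)
      rw [show (Char.ofNat (c.toNat + 32)).toNat = c.toNat + 32 from by
        unfold Char.ofNat; rw [dif_pos hv]; rfl] at hch
      omega
    · intro he
      subst he
      exact absurd hb.1 (by decide)
  · rw [if_neg (by simpa [Char.le_def] using h)]

theorem pv_mem_colon_lower (l : List Char) : ':' ∈ PySem.Chars.lower l ↔ ':' ∈ l := by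
  unfold PySem.Chars.lower
  simp only [List.mem_map]
  constructor
  · rintro ⟨a, ha, he⟩; rwa [(pv_lowerChar_colon a).mp he] at ha
  · intro h; exact ⟨':', h, (pv_lowerChar_colon ':').mpr rfl⟩

-- takeWhile with the "not a colon" predicate commutes with lowering
theorem pv_takeWhile_lower (l : List Char) :
    (PySem.Chars.lower l).takeWhile (· != ':') = PySem.Chars.lower (l.takeWhile (· != ':')) := by
  unfold PySem.Chars.lower
  rw [List.takeWhile_map]
  congr 1
  have : ((· != ':') ∘ PySem.Chars.lowerChar : Char → Bool) = (· != ':') := by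
    funext c
    simp only [Function.comp, bne]
    by_cases hc : c = ':'
    · subst hc; simp [(pv_lowerChar_colon ':').mpr rfl]
    · have : PySem.Chars.lowerChar c ≠ ':' := fun he => hc ((pv_lowerChar_colon c).mp he)
      simp [hc, this]
  rw [this]

theorem pv_prefix_iff (h sl : List Char) (hcol : ':' ∉ h) :
    (h ++ [':']) <+: sl ↔ (':' ∈ sl ∧ sl.takeWhile (· != ':') = h) := by
  induction h generalizing sl with
  | nil =>
    cases sl with
    | nil => simp
    | cons c r =>
      by_cases hc : c = ':'
      · subst hc; simp
      · simp [hc, List.cons_prefix_cons, Ne.symm hc]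
  | cons a h' ih =>
    have ha : a ≠ ':' := fun he => hcol (he ▸ List.mem_cons_self ..)
    have hcol' : ':' ∉ h' := fun hm => hcol (List.mem_cons_of_mem _ hm)
    cases sl with
    | nil => simp
    | cons c r =>
      by_cases hc : c = a
      · subst hc
        simp only [List.cons_append, List.cons_prefix_cons, true_and]
        rw [ih r hcol']
        simp [ha, List.mem_cons, Ne.symm ha]
      · constructor
        · rintro hp
          rw [List.cons_append, List.cons_prefix_cons] at hp
          exact absurd hp.1.symm hc
        · rintro ⟨-, htw⟩
          exfalso
          by_cases hcc : c = ':'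
          · subst hcc; simp at htw
          · rw [List.takeWhile_cons, if_pos (by simp [hcc])] at htw
            exact hc (List.head_eq_of_cons_eq htw)

theorem pv_find_go (l : List Char) (k : Nat) :
    PySem.Chars.find.go [':'] l k =
      if ':' ∈ l then ((k : Int) + (l.takeWhile (· != ':')).length) else -1 := by
  induction l generalizing k with
  | nil => simp [PySem.Chars.find.go]
  | cons c r ih =>
    rw [PySem.Chars.find.go]
    by_cases hc : c = ':'
    · subst hc
      simp [List.isPrefixOf]
    · have hp : [':'].isPrefixOf (c :: r) = false := by
        simp [List.isPrefixOf, Ne.symm hc]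
      rw [hp]
      simp only [Bool.false_eq_true, if_false]
      rw [ih (k + 1)]
      by_cases hr : ':' ∈ r
      · rw [if_pos hr, if_pos (List.mem_cons_of_mem _ hr), List.takeWhile_cons,
          if_pos (by simp [hc])]
        simp only [List.length_cons]
        push_cast; ring
      · rw [if_neg hr, if_neg (by simp [Ne.symm hc, hr])]

theorem pv_find_colon (s : String) :
    PySem.Str.find s ":" =
      if ':' ∈ s.toList then ((s.toList.takeWhile (· != ':')).length : Int) else -1 := by
  have h1 : (":" : String).toList = [':'] := rfl
  rw [PySem.Str.find, h1, PySem.Chars.find, pv_find_go]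
  simp

theorem pv_take_takeWhile (l : List Char) (p : Char → Bool) :
    l.take (l.takeWhile p).length = l.takeWhile p := by
  induction l with
  | nil => simp
  | cons c r ih =>
    rw [List.takeWhile_cons]
    split_ifs with h
    · simp [ih]
    · simp

theorem pv_drop_takeWhile (l : List Char) (p : Char → Bool) :
    l.drop ((l.takeWhile p).length + 1) = (l.dropWhile p).tail := by
  calc l.drop ((l.takeWhile p).length + 1)
      = (l.takeWhile p ++ l.dropWhile p).drop ((l.takeWhile p).length + 1) := by
        rw [List.takeWhile_append_dropWhile]
    _ = (l.dropWhile p).drop 1 := List.drop_length_add_append 1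
    _ = (l.dropWhile p).tail := List.drop_one

theorem pv_split_go_zero (fuel : Nat) (l cur : List Char) (acc : List (List Char)) :
    PySem.Chars.splitOnMax.go [':'] fuel 0 l cur acc = ((cur.reverse ++ l) :: acc).reverse := by
  cases fuel with
  | zero => rw [PySem.Chars.splitOnMax.go]
  | succ f =>
    cases l with
    | nil => rw [PySem.Chars.splitOnMax.go]; simp; omega
    | cons c r => rw [PySem.Chars.splitOnMax.go]; simp

theorem pv_split_go (l cur : List Char) (acc : List (List Char)) (fuel : Nat) (hf : l.length ≤ fuel) :
    PySem.Chars.splitOnMax.go [':'] fuel 1 l cur acc =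
      if ':' ∈ l then acc.reverse ++ [cur.reverse ++ l.takeWhile (· != ':'), (l.dropWhile (· != ':')).tail]
      else acc.reverse ++ [cur.reverse ++ l] := by
  induction l generalizing fuel cur acc with
  | nil =>
    cases fuel with
    | zero => simp [PySem.Chars.splitOnMax.go]
    | succ f => simp [PySem.Chars.splitOnMax.go]
  | cons c r ih =>
    cases fuel with
    | zero => simp at hf
    | succ f =>
      rw [PySem.Chars.splitOnMax.go]
      rw [if_neg (by omega)]
      by_cases hc : c = ':'
      · subst hc
        rw [if_pos (by simp [List.isPrefixOf])]
        rw [show (1 : Nat) - 1 = 0 from rfl, pv_split_go_zero]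
        simp
      · rw [if_neg (by simp [List.isPrefixOf, Ne.symm hc])]
        rw [ih (c :: cur) acc f (by simpa using Nat.lt_succ_iff.mp (by simpa using hf))]
        by_cases hr : ':' ∈ r
        · rw [if_pos hr, if_pos (by simp [hr])]
          simp [hc]
        · rw [if_neg hr, if_neg (by simp [Ne.symm hc, hr])]
          simp

theorem pv_tail_eq (s : String) (h : ':' ∈ s.toList) :
    pvTail s = PySem.Str.strip (PySem.Str.slice s (some (PySem.Str.find s ":" + 1)) none) := by
  have h1 : (":" : String).toList = [':'] := rfl
  rw [pvTail, PySem.Str.splitMax?, h1, PySem.Chars.splitMax?]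
  rw [if_neg (by simp)]
  rw [PySem.Chars.splitOnMax, if_neg (by omega)]
  rw [show (1 : Int).toNat = 1 from rfl]
  rw [pv_split_go _ _ _ _ (by omega), if_pos h]
  simp only [List.reverse_nil, List.nil_append, Option.map_some, Option.getD_some, List.map_cons,
    List.map_nil]
  rw [show PySem.List.pyGet?
      [String.ofList (s.toList.takeWhile (· != ':')), String.ofList ((s.toList.dropWhile (· != ':')).tail)] (1 : Int)
      = some (String.ofList ((s.toList.dropWhile (· != ':')).tail)) from by
    simp [PySem.List.pyGet?, PySem.List.pyIdx?]]
  rw [Option.getD_some]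
  congr 1
  rw [pv_find_colon, if_pos h]
  rw [PySem.Str.slice]
  rw [← String.toList_inj]
  simp only [String.toList_ofList, PySem.Chars.slice_eq_listSlice]
  rw [PySem.List.slice_from _ (by omega)]
  rw [show ((((s.toList.takeWhile (· != ':')).length : Int) + 1)).toNat
      = (s.toList.takeWhile (· != ':')).length + 1 from by omega]
  exact (pv_drop_takeWhile s.toList _).symm

-- every clause prefix is a colon-free head followed by one colon
theorem pv_clause_good : ∀ c ∈ pvClauses, ∃ hh, c.toList = hh ++ [':'] ∧ ':' ∉ hh := by
  intro c hc
  simp only [pvClauses, List.mem_cons, List.not_mem_nil, or_false] at hc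
  rcases hc with h | h | h | h | h | h | h <;> subst h
  · exact ⟨['-', ' ', 'f', 'r', 'o', 'm'], by decide, by decide⟩
  · exact ⟨['-', ' ', 'w', 'h', 'e', 'r', 'e'], by decide, by decide⟩
  · exact ⟨['-', ' ', 'g', 'r', 'o', 'u', 'p', ' ', 'b', 'y'], by decide, by decide⟩
  · exact ⟨['-', ' ', 'h', 'a', 'v', 'i', 'n', 'g'], by decide, by decide⟩
  · exact ⟨['-', ' ', 'o', 'r', 'd', 'e', 'r', ' ', 'b', 'y'], by decide, by decide⟩
  · exact ⟨['-', ' ', 's', 'e', 'l', 'e', 'c', 't'], by decide, by decide⟩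
  · exact ⟨['-', ' ', 'l', 'i', 'm', 'i', 't'], by decide, by decide⟩

-- B's key as a character list, in the colon case
theorem pv_key_toList (s : String) (h : ':' ∈ s.toList) :
    (PySem.Str.lower (PySem.Str.slice s none (some (PySem.Str.find s ":"))) ++ ":").toList
      = PySem.Chars.lower (s.toList.takeWhile (· != ':')) ++ [':'] := by
  have hx : (PySem.Str.lower (PySem.Str.slice s none (some (PySem.Str.find s ":")))).toList
      = PySem.Chars.lower (s.toList.takeWhile (· != ':')) := by
    rw [PySem.Str.lower, PySem.Str.slice]
    rw [String.toList_ofList, String.toList_ofList, PySem.Chars.slice_eq_listSlice]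
    rw [pv_find_colon, if_pos h]
    rw [PySem.List.slice_to _ (by omega)]
    rw [Int.toNat_natCast, pv_take_takeWhile]
  rw [String.toList_append, hx]
  rfl

-- the startswith test against a clause is exactly "B's key equals that clause"
theorem pv_match_iff (s c : String) (hh : List Char) (hc : c.toList = hh ++ [':'])
    (hcol : ':' ∉ hh) (hcolon : ':' ∈ s.toList) :
    PySem.Str.startswith (PySem.Str.lower s) c = true ↔
      PySem.Str.lower (PySem.Str.slice s none (some (PySem.Str.find s ":"))) ++ ":" = c := by
  rw [PySem.Str.startswith, PySem.Chars.startswith, List.isPrefixOf_iff_prefix]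
  rw [show (PySem.Str.lower s).toList = PySem.Chars.lower s.toList from by
    rw [PySem.Str.lower, String.toList_ofList]]
  rw [hc, pv_prefix_iff _ _ hcol]
  rw [pv_takeWhile_lower]
  constructor
  · rintro ⟨-, htw⟩
    rw [← String.toList_inj, pv_key_toList s hcolon, hc, htw]
  · intro hk
    refine ⟨(pv_mem_colon_lower _).mpr hcolon, ?_⟩
    have := congrArg String.toList hk
    rw [pv_key_toList s hcolon, hc] at this
    exact List.append_cancel_right this

theorem pv_no_colon_no_match (s c : String) (hh : List Char) (hc : c.toList = hh ++ [':'])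
    (hcol : ':' ∉ hh) (hno : ':' ∉ s.toList) :
    PySem.Str.startswith (PySem.Str.lower s) c = false := by
  rw [PySem.Str.startswith, PySem.Chars.startswith]
  by_contra hcon
  have hb : c.toList.isPrefixOf (PySem.Str.lower s).toList = true := by
    revert hcon; cases c.toList.isPrefixOf (PySem.Str.lower s).toList <;> simp
  rw [List.isPrefixOf_iff_prefix, hc] at hb
  rw [show (PySem.Str.lower s).toList = PySem.Chars.lower s.toList from by
    rw [PySem.Str.lower, String.toList_ofList]] at hb
  rw [pv_prefix_iff _ _ hcol] at hb
  exact hno ((pv_mem_colon_lower _).mp hb.1)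

theorem pv_scan_none (s sl : String) (cs : List String) (d : PySem.Dict String (List String))
    (hall : ∀ c ∈ cs, PySem.Str.startswith sl c = false) : pvScan s sl cs d = d := by
  induction cs with
  | nil => rfl
  | cons c rest ih =>
    rw [pvScan, if_neg (by rw [hall c (List.mem_cons_self ..)]; simp)]
    exact ih (fun c' hc' => hall c' (List.mem_cons_of_mem _ hc'))

theorem pv_scan_hit (s sl : String) (cs : List String) (d : PySem.Dict String (List String))
    (c0 : String) (hmem : c0 ∈ cs) (hc0 : PySem.Str.startswith sl c0 = true)
    (huniq : ∀ c ∈ cs, PySem.Str.startswith sl c = true → c = c0) :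
    pvScan s sl cs d = d.modify c0 [] (fun v => v ++ [pvTail s]) := by
  induction cs with
  | nil => exact absurd hmem (List.not_mem_nil)
  | cons c rest ih =>
    by_cases hm : PySem.Str.startswith sl c = true
    · rw [pvScan, if_pos hm, huniq c (List.mem_cons_self ..) hm]
    · rw [pvScan, if_neg hm]
      have hne : c0 ≠ c := fun he => hm (he ▸ hc0)
      exact ih ((List.mem_cons.mp hmem).resolve_left hne)
        (fun c' hc' h' => huniq c' (List.mem_cons_of_mem _ hc') h')

-- the per-line bodies of the two folds agree on every dict whose key list is the clause list
theorem pv_step (s : String) (d : PySem.Dict String (List String)) (hk : d.keys = pvClauses) :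
    pvScan s (PySem.Str.lower s) pvClauses d =
      (let i := PySem.Str.find s ":"
       if i < 0 then d
       else
         let key := PySem.Str.lower (PySem.Str.slice s none (some i)) ++ ":"
         if d.contains key then
           d.modify key [] (fun v => v ++ [PySem.Str.strip (PySem.Str.slice s (some (i + 1)) none)])
         else d) := by
  by_cases hcolon : ':' ∈ s.toList
  · have hi : ¬ PySem.Str.find s ":" < 0 := by
      rw [pv_find_colon, if_pos hcolon]; omega
    simp only [if_neg hi]
    set key := PySem.Str.lower (PySem.Str.slice s none (some (PySem.Str.find s ":"))) ++ ":" with hkey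
    by_cases hmemk : key ∈ pvClauses
    · have hcont : d.contains key = true := by
        rw [PySem.Dict.contains_eq_decide_mem_keys, hk]
        simpa using hmemk
      rw [if_pos hcont]
      obtain ⟨hh, hcl, hcolh⟩ := pv_clause_good key hmemk
      rw [pv_scan_hit s _ pvClauses d key hmemk
        ((pv_match_iff s key hh hcl hcolh hcolon).mpr rfl)
        (fun c hc hmc => by
          obtain ⟨hh', hcl', hcolh'⟩ := pv_clause_good c hc
          exact ((pv_match_iff s c hh' hcl' hcolh' hcolon).mp hmc).symm)]
      rw [pv_tail_eq s hcolon]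
    · have hcont : d.contains key = false := by
        rw [PySem.Dict.contains_eq_decide_mem_keys, hk]
        simpa using hmemk
      rw [if_neg (by simp [hcont])]
      exact pv_scan_none s _ pvClauses d (fun c hc => by
        obtain ⟨hh', hcl', hcolh'⟩ := pv_clause_good c hc
        by_contra hcon
        have hmc : PySem.Str.startswith (PySem.Str.lower s) c = true := by
          revert hcon; cases PySem.Str.startswith (PySem.Str.lower s) c <;> simp
        have hkc : PySem.Str.lower (PySem.Str.slice s none (some (PySem.Str.find s ":"))) ++ ":" = c :=
          (pv_match_iff s c hh' hcl' hcolh' hcolon).mp hmc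
        exact hmemk (by rw [hkey, hkc]; exact hc))
  · have hi : PySem.Str.find s ":" < 0 := by
      rw [pv_find_colon, if_neg hcolon]; omega
    simp only [if_pos hi]
    exact pv_scan_none s _ pvClauses d (fun c hc => by
      obtain ⟨hh', hcl', hcolh'⟩ := pv_clause_good c hc
      exact pv_no_colon_no_match s c hh' hcl' hcolh' hcolon)

theorem pv_step_keys (s : String) (d : PySem.Dict String (List String)) (hk : d.keys = pvClauses) :
    (pvScan s (PySem.Str.lower s) pvClauses d).keys = pvClauses := by
  rw [pv_step s d hk]
  by_cases h1 : PySem.Str.find s ":" < 0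
  · simp only [if_pos h1]; exact hk
  · simp only [if_neg h1]
    by_cases h2 : d.contains (PySem.Str.lower (PySem.Str.slice s none (some (PySem.Str.find s ":"))) ++ ":") = true
    · simp only [if_pos h2]
      rw [PySem.Dict.modify, PySem.Dict.keys_insert_of_contains d _ h2]
      exact hk
    · simp only [Bool.not_eq_true] at h2
      simp only [h2, Bool.false_eq_true, if_false]
      exact hk

theorem pv_fold (L : List String) (d : PySem.Dict String (List String)) (hk : d.keys = pvClauses) :
    L.foldl (fun out line =>
        let s := PySem.Str.strip line
        let sl := PySem.Str.lower s
        pvScan s sl pvClauses out) d =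
      L.foldl (fun out line =>
        let s := PySem.Str.strip line
        let i := PySem.Str.find s ":"
        if i < 0 then out
        else
          let key := PySem.Str.lower (PySem.Str.slice s none (some i)) ++ ":"
          if out.contains key then
            out.modify key [] (fun v => v ++ [PySem.Str.strip (PySem.Str.slice s (some (i + 1)) none)])
          else out) d := by
  induction L generalizing d with
  | nil => simp only [List.foldl_nil]
  | cons l rest ih =>
    simp only [List.foldl_cons]
    rw [← pv_step (PySem.Str.strip l) d hk]
    exact ih _ (pv_step_keys (PySem.Str.strip l) d hk)

-- ===== VERDICT (by name: the statement is the Claim_ definition above) =====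
theorem segment_plan_py_spec : Claim_equal_segment_plan_py := by
  intro plan_text _
  unfold Spec_segment_plan_py segment_plan_py segment_plan_py_alt
  exact congrArg PySem.Dict.items (pv_fold (PySem.Str.splitlines plan_text) _ (by rfl))
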